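-- pv_equiv track=rewrite | github.com/AFKMartin/LeetCode | 2501 - 2750/2591. Distribute Money to Maximum Children.py | distMoney
-- ===== SOURCE A (Python) =====
-- def distMoney(money, children):
--     if money < children:
--         return -1
--
--     remain = money - children
--     maximum8 = min(remain // 7, children)
--
--     while maximum8 >= 0:
--         lefts = remain - 7 * maximum8
--         other = children - maximum8
--
--         if lefts == 0:
--             return maximum8
--         if other > 0 and not (other == 1 and lefts == 3):
--             return maximum8
--
--         maximum8 -= 1
--
--     return -1
-- ===== SOURCE B (Python) =====
-- def distMoney(money, children):
--     if money < children or children < 0: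
--         return -1
--     remain = money - children
--     count = min(remain // 7, children)
--     leftover = remain - 7 * count
--     rest = children - count
--     if rest == 0 and leftover > 0:
--         count -= 1
--     elif rest == 1 and leftover == 3:
--         count -= 1
--     return count
-- ===== Notes on version B (the rewrite author's own statement) =====
-- stated objective: simpler
-- what changed: Replaces A's decrementing while-loop with a branch-free closed form: count = min((money-children)//7, children) with at most one corrective decrement for the two exceptional remainder cases.
import Mathlib
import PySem

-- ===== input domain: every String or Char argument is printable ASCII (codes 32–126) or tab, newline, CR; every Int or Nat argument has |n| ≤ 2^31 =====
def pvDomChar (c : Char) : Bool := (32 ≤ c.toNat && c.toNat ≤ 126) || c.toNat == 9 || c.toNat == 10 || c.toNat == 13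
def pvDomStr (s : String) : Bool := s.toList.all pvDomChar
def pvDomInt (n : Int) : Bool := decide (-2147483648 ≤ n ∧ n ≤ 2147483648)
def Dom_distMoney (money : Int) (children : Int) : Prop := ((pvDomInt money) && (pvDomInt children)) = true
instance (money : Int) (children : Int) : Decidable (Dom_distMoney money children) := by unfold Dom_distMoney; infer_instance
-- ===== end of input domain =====

-- B replaces A's decrementing while-loop by a closed-form count with at most one corrective decrement (objective: simpler).

-- ===== PORT A =====
-- the while loop of A: while maximum8 >= 0: …
def distMoneyLoop (remain : Int) (children : Int) (maximum8 : Int) : Int :=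
  if _h : maximum8 ≥ 0 then
    let lefts := remain - 7 * maximum8
    let other := children - maximum8
    if lefts = 0 then maximum8
    else if other > 0 ∧ ¬(other = 1 ∧ lefts = 3) then maximum8
    else distMoneyLoop remain children (maximum8 - 1)
  else -1
termination_by (maximum8 + 1).toNat
decreasing_by omega

def distMoney (money : Int) (children : Int) : Int :=
  if money < children then -1
  else
    let remain := money - children
    let maximum8 := min (PySem.Int.floordiv remain 7) children
    distMoneyLoop remain children maximum8

-- ===== PORT B =====
def distMoney_alt (money : Int) (children : Int) : Int :=
  if money < children ∨ children < 0 then -1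
  else
    let remain := money - children
    let count := min (PySem.Int.floordiv remain 7) children
    let leftover := remain - 7 * count
    let rest := children - count
    if rest = 0 ∧ leftover > 0 then count - 1
    else if rest = 1 ∧ leftover = 3 then count - 1
    else count

-- ===== PRECONDITION & SPEC =====
def Spec_distMoney (money : Int) (children : Int) (out : Int) : Prop := out = distMoney_alt money children
instance (money : Int) (children : Int) (out : Int) : Decidable (Spec_distMoney money children out) := by unfold Spec_distMoney; infer_instance

-- ===== CLAIM (what is proved, stated in full; the proofs are below) =====
def Claim_equal_distMoney : Prop := ∀ (money : Int) (children : Int), Dom_distMoney money children → Spec_distMoney money children (distMoney money children)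

-- ===== LEMMAS AND PROOFS =====

-- floor division by 7 brackets the dividend
theorem fdiv7_bracket (a : Int) : 7 * (PySem.Int.floordiv a 7) ≤ a ∧ a < 7 * (PySem.Int.floordiv a 7) + 7 := by
  unfold PySem.Int.floordiv
  have hm := Int.mul_fdiv_add_fmod a 7
  have hb : 0 ≤ a.fmod 7 ∧ a.fmod 7 < 7 := by
    rw [Int.fmod_eq_emod]
    simp only [show ((0:Int) ≤ 7 ∨ (7:Int) ∣ a) from Or.inl (by norm_num), if_pos, add_zero]
    exact ⟨Int.emod_nonneg a (by norm_num), Int.emod_lt_of_pos a (by norm_num)⟩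
  omega

-- ===== VERDICT (by name: the statement is the Claim_ definition above) =====
theorem distMoney_spec : Claim_equal_distMoney := by
  intro money children _dom
  unfold Spec_distMoney distMoney distMoney_alt
  have hbr := fdiv7_bracket (money - children)
  rw [distMoneyLoop, distMoneyLoop]
  dsimp only
  split_ifs <;> omega
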